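-- pv_equiv track=rewrite | github.com/sangjun0412/codingTest_base | 프로그래머스/lv2/42626. 더 맵게/더 맵게.py | solution
-- ===== SOURCE A (Python) =====
-- import heapq
--
-- def solution(scoville, K):
--     answer = 0
--     heapq.heapify(scoville)
--
--     while True:
--         if scoville[0] >= K:
--             break
--         elif scoville[0] < K and len(scoville) < 2:
--             answer = -1
--             break
--         else:
--             a= heapq.heappop(scoville)
--             b= heapq.heappop(scoville)
--             tmp = a + b * 2
--             heapq.heappush(scoville, tmp)
--         answer += 1
--     return answer
-- ===== SOURCE B (Python) =====
-- def solution(scoville, K):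
--     answer = 0
--     while True:
--         smallest = scoville[0]
--         for x in scoville:
--             if x < smallest:
--                 smallest = x
--         if smallest >= K:
--             break
--         if len(scoville) < 2:
--             answer = -1
--             break
--         scoville.remove(smallest)
--         second = scoville[0]
--         for x in scoville:
--             if x < second:
--                 second = x
--         scoville.remove(second)
--         scoville.append(smallest + 2 * second)
--         answer += 1
--     return answer
-- ===== Notes on version B (the rewrite author's own statement) =====
-- stated objective: alternative
-- what changed: B drops heapq's binary-heap machinery entirely: each round it finds the minimum and second minimum by plain linear scans over an unordered list (remove-by-value and append), instead of maintaining heap order with heapify/heappop/heappush.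
import Mathlib
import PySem

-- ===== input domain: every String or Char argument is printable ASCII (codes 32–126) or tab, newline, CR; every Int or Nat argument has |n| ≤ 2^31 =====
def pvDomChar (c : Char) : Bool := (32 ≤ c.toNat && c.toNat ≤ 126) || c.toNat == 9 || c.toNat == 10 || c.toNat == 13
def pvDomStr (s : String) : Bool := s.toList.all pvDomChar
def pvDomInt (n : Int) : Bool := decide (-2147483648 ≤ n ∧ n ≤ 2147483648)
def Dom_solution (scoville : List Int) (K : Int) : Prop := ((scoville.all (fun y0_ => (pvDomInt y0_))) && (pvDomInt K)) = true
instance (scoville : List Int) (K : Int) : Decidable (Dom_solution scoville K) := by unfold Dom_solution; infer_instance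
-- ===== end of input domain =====

-- B replaces A's heapq min-heap by a plain list with repeated linear min-scans; same return
-- value. In Python both mutate `scoville` in place and leave different residual contents:
-- the equivalence proved here is about the return value only.

-- ===== PORT A =====
-- heapq is not covered by PySem, so it is ported by hand, step for step after CPython's
-- Lib/heapq.py (_siftdown, _siftup, heapify, heappush, heappop); exact for int lists.

-- CPython _siftdown's while-loop (newitem = heap[pos] is read by heapSiftdown below).

def heapSiftdownLoop (l : List Int) (startpos pos : Nat) (newitem : Int) : List Int :=
  if _h : startpos < pos then
    let parentpos := (pos - 1) / 2
    let parent := l.getD parentpos 0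
    if newitem < parent then
      heapSiftdownLoop (l.set pos parent) startpos parentpos newitem
    else
      l.set pos newitem
  else
    l.set pos newitem
termination_by pos
decreasing_by omega

-- getD/set helpers

-- CPython _siftdown(heap, startpos, pos).

def heapSiftdown (l : List Int) (startpos pos : Nat) : List Int :=
  heapSiftdownLoop l startpos pos (l.getD pos 0)

-- CPython _siftup's while-loop: returns the final list and the final pos.

def heapSiftupLoop (l : List Int) (pos childpos endpos : Nat) : List Int × Nat :=
  if _h : childpos < endpos then
    if childpos + 1 < endpos ∧ ¬ (l.getD childpos 0 < l.getD (childpos + 1) 0) then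
      heapSiftupLoop (l.set pos (l.getD (childpos + 1) 0)) (childpos + 1) (2 * (childpos + 1) + 1) endpos
    else
      heapSiftupLoop (l.set pos (l.getD childpos 0)) childpos (2 * childpos + 1) endpos
  else
    (l, pos)
termination_by endpos - childpos
decreasing_by all_goals omega

-- CPython _siftup(heap, pos).

def heapSiftup (l : List Int) (pos : Nat) : List Int :=
  let newitem := l.getD pos 0
  let r := heapSiftupLoop l pos (2 * pos + 1) l.length
  heapSiftdown (r.1.set r.2 newitem) pos r.2

-- CPython heapify: for i in reversed(range(n//2)): _siftup(heap, i).

def heapify (l : List Int) : List Int :=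
  (List.range (l.length / 2)).reverse.foldl (fun h i => heapSiftup h i) l

-- CPython heappush: heap.append(item); _siftdown(heap, 0, len(heap)-1).

def heappush (l : List Int) (item : Int) : List Int :=
  heapSiftdown (l ++ [item]) 0 l.length

-- CPython heappop; none = IndexError on an empty heap.

def heappop (l : List Int) : Option (Int × List Int) :=
  match l.getLast? with
  | none => none
  | some lastelt =>
    let rest := l.dropLast
    if rest.isEmpty then some (lastelt, rest)
    else some (rest.getD 0 0, heapSiftup (rest.set 0 lastelt) 0)

-- A's while-loop; the fuel only makes the recursion total (scoville.length always
-- suffices: each mix shortens the heap by one, so at most length-1 mixes happen).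

def solutionLoop (fuel : Nat) (h : List Int) (K answer : Int) : Int :=
  match fuel with
  | 0 => answer
  | fuel + 1 =>
    if h.getD 0 0 ≥ K then answer
    else if h.length < 2 then -1
    else
      match heappop h with
      | none => answer
      | some (a, h1) =>
        match heappop h1 with
        | none => answer
        | some (b, h2) => solutionLoop fuel (heappush h2 (a + b * 2)) K (answer + 1)

def solution (scoville : List Int) (K : Int) : Int :=
  solutionLoop scoville.length (heapify scoville) K 0

-- ===== PORT B =====
-- the `for x in scoville: if x < smallest: smallest = x` scan

def minScan (l : List Int) (cur : Int) : Int :=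
  l.foldl (fun s x => if x < s then x else s) cur

-- B's while-loop (same fuel discipline as A's loop)

def solutionAltLoop (fuel : Nat) (l : List Int) (K answer : Int) : Int :=
  match fuel with
  | 0 => answer
  | fuel + 1 =>
    let smallest := minScan l (l.getD 0 0)
    if smallest ≥ K then answer
    else if l.length < 2 then -1
    else
      let l1 := l.erase smallest
      let second := minScan l1 (l1.getD 0 0)
      solutionAltLoop fuel ((l1.erase second) ++ [smallest + 2 * second]) K (answer + 1)

def solution_alt (scoville : List Int) (K : Int) : Int :=
  solutionAltLoop scoville.length scoville K 0

-- ===== PRECONDITION & SPEC =====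
-- Both A and B raise IndexError (scoville[0]) on an empty list; Pre_ excludes exactly that.
def Pre_solution (scoville : List Int) (K : Int) : Prop := scoville ≠ []
instance (scoville : List Int) (K : Int) : Decidable (Pre_solution scoville K) := by
  unfold Pre_solution; infer_instance

def pvWitness_solution : List Int × Int := ([1, 2, 3, 9, 10, 12], 7)

def Spec_solution (scoville : List Int) (K : Int) (out : Int) : Prop := out = solution_alt scoville K
instance (scoville : List Int) (K : Int) (out : Int) : Decidable (Spec_solution scoville K out) := by
  unfold Spec_solution; infer_instance

-- ===== CLAIM (what is proved, stated in full; the proofs are below) =====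
def Claim_equal_solution : Prop := ∀ (scoville : List Int) (K : Int), Dom_solution scoville K → Pre_solution scoville K → Spec_solution scoville K (solution scoville K)

-- ===== LEMMAS AND PROOFS =====

lemma pvGetD_set_self (l : List Int) (i : Nat) (a : Int) (h : i < l.length) :
    (l.set i a).getD i 0 = a := by
  simp [List.getD_eq_getElem?_getD, h]

lemma pvGetD_set_ne (l : List Int) (i j : Nat) (a : Int) (h : i ≠ j) :
    (l.set i a).getD j 0 = l.getD j 0 := by
  simp [List.getD_eq_getElem?_getD, List.getElem?_set_ne h]

lemma pvSet_getD_self (l : List Int) (i : Nat) : l.set i (l.getD i 0) = l := by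
  induction l generalizing i with
  | nil => simp
  | cons a t ih =>
    cases i with
    | zero => simp [List.getD]
    | succ n =>
      simp only [List.set, List.getD_cons_succ]
      simpa [List.getD_eq_getElem?_getD] using ih n

lemma pvCount_set (l : List Int) (i : Nat) (a y : Int) (h : i < l.length) :
    (l.set i a).count y + (if l.getD i 0 = y then 1 else 0)
      = l.count y + (if a = y then 1 else 0) := by
  induction l generalizing i with
  | nil => simp at h
  | cons b t ih =>
    cases i with
    | zero =>
      simp only [List.set, List.getD_cons_zero, List.count_cons]
      by_cases h1 : b = y <;> by_cases h2 : a = y <;> simp [h1, h2]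
    | succ n =>
      simp only [List.set, List.getD_cons_succ, List.count_cons]
      have := ih n (by simpa using h)
      simp only [List.getD_eq_getElem?_getD] at this ⊢
      by_cases h1 : b = y <;> simp [h1] <;> omega

lemma pvSet_set_perm (l : List Int) (i j : Nat) (x : Int)
    (hi : i < l.length) (hj : j < l.length) (hne : i ≠ j) :
    ((l.set i (l.getD j 0)).set j x).Perm (l.set i x) := by
  rw [List.perm_iff_count]
  intro y
  have hj' : j < (l.set i (l.getD j 0)).length := by simpa using hj
  have c1 := pvCount_set (l.set i (l.getD j 0)) j (a := x) (y := y) hj'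
  have c2 := pvCount_set l i (a := l.getD j 0) (y := y) hi
  have c3 := pvCount_set l i (a := x) (y := y) hi
  rw [pvGetD_set_ne l i j _ hne] at c1
  have hmem : l.getD i 0 = y → 1 ≤ l.count y := by
    intro hy
    have : y ∈ l := by
      rw [← hy]
      rw [List.getD_eq_getElem l 0 hi]
      exact List.getElem_mem hi
    exact List.count_pos_iff.mpr this
  split_ifs at c1 c2 c3 <;> omega

lemma pvGetD_append_left (l l' : List Int) (j : Nat) (h : j < l.length) :
    (l ++ l').getD j 0 = l.getD j 0 := by
  simp [List.getD_eq_getElem?_getD, List.getElem?_append_left h]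

def inSub (r d : Nat) : Bool :=
  if d ≤ r then d == r else inSub r ((d - 1) / 2)
termination_by d
decreasing_by omega

lemma inSub_self (r : Nat) : inSub r r = true := by
  rw [inSub]; simp

lemma inSub_le {r d : Nat} (h : inSub r d = true) : r ≤ d := by
  induction d using Nat.strong_induction_on with
  | _ d ih =>
    rw [inSub] at h
    split at h
    · simp at h; omega
    · have := ih ((d - 1) / 2) (by omega) h
      omega

lemma inSub_zero (d : Nat) : inSub 0 d = true := by
  induction d using Nat.strong_induction_on with
  | _ d ih =>
    rw [inSub]
    split
    · simp; omega
    · exact ih ((d - 1) / 2) (by omega)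

lemma inSub_child {r d : Nat} (hd : 0 < d) (h : inSub r ((d - 1) / 2) = true) :
    inSub r d = true := by
  have hr := inSub_le h
  rw [inSub]
  split
  · omega
  · exact h

lemma inSub_parent {r d : Nat} (h : inSub r d = true) (hne : d ≠ r) :
    inSub r ((d - 1) / 2) = true := by
  rw [inSub] at h
  split at h
  · simp at h; omega
  · exact h

theorem siftdownLoop_spec (l : List Int) (start pos : Nat) (x : Int)
    (hpos : pos < l.length) (hsub : inSub start pos = true)
    (hI1 : ∀ k, 0 < k → k < l.length → inSub start ((k - 1) / 2) = true → k ≠ pos →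
      l.getD ((k - 1) / 2) 0 ≤ l.getD k 0)
    (hI2 : ∀ k, 0 < k → k < l.length → (k - 1) / 2 = pos → x ≤ l.getD k 0)
    (hI6 : ∀ k, 0 < k → k < l.length → (k - 1) / 2 = pos →
      (pos = start ∨ l.getD ((pos - 1) / 2) 0 ≤ l.getD k 0)) :
    (heapSiftdownLoop l start pos x).length = l.length ∧
    (heapSiftdownLoop l start pos x).Perm (l.set pos x) ∧
    (∀ j, inSub start j = false → (heapSiftdownLoop l start pos x).getD j 0 = l.getD j 0) ∧
    (∀ k, 0 < k → k < l.length → inSub start ((k - 1) / 2) = true →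
      (heapSiftdownLoop l start pos x).getD ((k - 1) / 2) 0 ≤ (heapSiftdownLoop l start pos x).getD k 0) := by
  fun_induction heapSiftdownLoop l start pos x with
  | case1 l pos hlt parentpos parent hx ih =>
    have hppdef : parentpos = (pos - 1) / 2 := rfl
    have hpardef : parent = l.getD parentpos 0 := rfl
    have hppos : parentpos < pos := by omega
    have hpp_lt : parentpos < l.length := by omega
    have hsub2 : inSub start parentpos = true := inSub_parent hsub (by omega)
    have hget_pp : (l.set pos parent).getD parentpos 0 = l.getD parentpos 0 :=
      pvGetD_set_ne l pos parentpos parent (by omega)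
    have hget_pos : (l.set pos parent).getD pos 0 = parent := pvGetD_set_self l pos parent hpos
    have hI1' : ∀ k, 0 < k → k < (l.set pos parent).length →
        inSub start ((k - 1) / 2) = true → k ≠ parentpos →
        (l.set pos parent).getD ((k - 1) / 2) 0 ≤ (l.set pos parent).getD k 0 := by
      intro k hk0 hklen hksub hkne
      rw [List.length_set] at hklen
      by_cases hkp : k = pos
      · subst hkp
        rw [(by omega : (k - 1) / 2 = parentpos), hget_pp, hget_pos, hpardef]
      · by_cases hparent : (k - 1) / 2 = pos
        · rcases hI6 k hk0 hklen hparent with h6 | h6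
          · omega
          · rw [hparent, hget_pos, pvGetD_set_ne l pos k parent (by omega)]
            rw [hpardef, hppdef]
            exact h6
        · rw [pvGetD_set_ne l pos _ parent (by omega), pvGetD_set_ne l pos k parent (by omega)]
          exact hI1 k hk0 hklen hksub hkp
    have hI2' : ∀ k, 0 < k → k < (l.set pos parent).length → (k - 1) / 2 = parentpos →
        x ≤ (l.set pos parent).getD k 0 := by
      intro k hk0 hklen hkpar
      rw [List.length_set] at hklen
      by_cases hkp : k = pos
      · subst hkp; rw [hget_pos]; exact le_of_lt hx
      · rw [pvGetD_set_ne l pos k parent (by omega)]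
        have h1 : l.getD ((k - 1) / 2) 0 ≤ l.getD k 0 :=
          hI1 k hk0 hklen (by rw [hkpar]; exact hsub2) hkp
        rw [hkpar] at h1
        calc x ≤ parent := le_of_lt hx
          _ = l.getD parentpos 0 := hpardef
          _ ≤ l.getD k 0 := h1
    have hI6' : ∀ k, 0 < k → k < (l.set pos parent).length → (k - 1) / 2 = parentpos →
        (parentpos = start ∨
          (l.set pos parent).getD ((parentpos - 1) / 2) 0 ≤ (l.set pos parent).getD k 0) := by
      intro k hk0 hklen hkpar
      rw [List.length_set] at hklen
      by_cases hps : parentpos = start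
      · exact Or.inl hps
      · right
        have hpp0 : 0 < parentpos := by
          have := inSub_le hsub2
          omega
        rw [pvGetD_set_ne l pos ((parentpos - 1) / 2) parent (by omega)]
        have hpar_rel : l.getD ((parentpos - 1) / 2) 0 ≤ l.getD parentpos 0 :=
          hI1 parentpos hpp0 hpp_lt (inSub_parent hsub2 hps) (by omega)
        by_cases hkp : k = pos
        · subst hkp
          rw [hget_pos, hpardef]
          exact hpar_rel
        · rw [pvGetD_set_ne l pos k parent (by omega)]
          have h1 : l.getD ((k - 1) / 2) 0 ≤ l.getD k 0 :=
            hI1 k hk0 hklen (by rw [hkpar]; exact hsub2) hkp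
          rw [hkpar] at h1
          exact le_trans hpar_rel h1
    obtain ⟨ih1, ih2, ih3, ih4⟩ := ih (by simpa using hpp_lt) hsub2 hI1' hI2' hI6'
    refine ⟨?_, ?_, ?_, ?_⟩
    · rw [ih1, List.length_set]
    · refine ih2.trans ?_
      rw [hpardef]
      exact pvSet_set_perm l pos parentpos x hpos hpp_lt (by omega)
    · intro j hj
      rw [ih3 j hj]
      have hjne : j ≠ pos := by
        intro h; rw [h, hsub] at hj; exact absurd hj (by simp)
      exact pvGetD_set_ne l pos j parent (by omega)
    · intro k hk0 hklen hksub
      exact ih4 k hk0 (by rw [List.length_set]; exact hklen) hksub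
  | case2 l pos hlt parentpos parent hx =>
    have hppdef : parentpos = (pos - 1) / 2 := rfl
    have hpardef : parent = l.getD parentpos 0 := rfl
    refine ⟨by simp, List.Perm.refl _, ?_, ?_⟩
    · intro j hj
      have hjne : j ≠ pos := by
        intro h; rw [h, hsub] at hj; exact absurd hj (by simp)
      exact pvGetD_set_ne l pos j x (by omega)
    · intro k hk0 hklen hksub
      by_cases hkp : k = pos
      · subst hkp
        rw [pvGetD_set_ne l k ((k - 1) / 2) x (by omega), pvGetD_set_self l k x hpos]
        rw [← hppdef, ← hpardef]
        omega
      · by_cases hparent : (k - 1) / 2 = pos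
        · rw [hparent, pvGetD_set_self l pos x hpos, pvGetD_set_ne l pos k x (by omega)]
          exact hI2 k hk0 hklen hparent
        · rw [pvGetD_set_ne l pos ((k - 1) / 2) x (by omega), pvGetD_set_ne l pos k x (by omega)]
          exact hI1 k hk0 hklen hksub hkp
  | case3 l pos hnlt =>
    have hps : pos = start := by
      have := inSub_le hsub
      omega
    refine ⟨by simp, List.Perm.refl _, ?_, ?_⟩
    · intro j hj
      have hjne : j ≠ pos := by
        intro h; rw [h, hsub] at hj; exact absurd hj (by simp)
      exact pvGetD_set_ne l pos j x (by omega)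
    · intro k hk0 hklen hksub
      by_cases hkp : k = pos
      · subst hkp
        have := inSub_le hksub
        omega
      · by_cases hparent : (k - 1) / 2 = pos
        · rw [hparent, pvGetD_set_self l pos x hpos, pvGetD_set_ne l pos k x (by omega)]
          exact hI2 k hk0 hklen hparent
        · rw [pvGetD_set_ne l pos ((k - 1) / 2) x (by omega), pvGetD_set_ne l pos k x (by omega)]
          exact hI1 k hk0 hklen hksub hkp

lemma siftup_transfer (l : List Int) (start pos childpos endpos c : Nat)
    (he : endpos = l.length) (hc : childpos = 2 * pos + 1) (hcp : childpos < endpos)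
    (hzc : c = childpos ∨ c = childpos + 1) (hcend : c < endpos)
    (hsub : inSub start pos = true)
    (hmin : ∀ k, 0 < k → k < endpos → (k - 1) / 2 = pos → l.getD c 0 ≤ l.getD k 0)
    (hJ1 : ∀ k, 0 < k → k < endpos → inSub start ((k - 1) / 2) = true → k ≠ pos →
      (k - 1) / 2 ≠ pos → l.getD ((k - 1) / 2) 0 ≤ l.getD k 0)
    (hJ6 : ∀ k, 0 < k → k < endpos → (k - 1) / 2 = pos →
      (pos = start ∨ l.getD ((pos - 1) / 2) 0 ≤ l.getD k 0)) :
    inSub start c = true ∧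
    (∀ k, 0 < k → k < endpos → inSub start ((k - 1) / 2) = true → k ≠ c →
      (k - 1) / 2 ≠ c →
      (l.set pos (l.getD c 0)).getD ((k - 1) / 2) 0 ≤ (l.set pos (l.getD c 0)).getD k 0) ∧
    (∀ k, 0 < k → k < endpos → (k - 1) / 2 = c →
      (c = start ∨
        (l.set pos (l.getD c 0)).getD ((c - 1) / 2) 0 ≤ (l.set pos (l.getD c 0)).getD k 0)) := by
  have hcpar : (c - 1) / 2 = pos := by omega
  have hposn : pos < l.length := by omega
  have hsubc : inSub start c = true := inSub_child (by omega) (by rw [hcpar]; exact hsub)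
  have hget_pos : (l.set pos (l.getD c 0)).getD pos 0 = l.getD c 0 :=
    pvGetD_set_self l pos _ hposn
  refine ⟨hsubc, ?_, ?_⟩
  · intro k hk0 hklen hksub hkne hkpne
    by_cases hkp : k = pos
    · subst hkp
      rw [pvGetD_set_ne l k ((k - 1) / 2) _ (by omega), hget_pos]
      rcases hJ6 c (by omega) hcend hcpar with h | h
      · -- pos = start, but then inSub start ((pos-1)/2) forces a contradiction with 0 < k
        have := inSub_le hksub
        omega
      · exact h
    · by_cases hparent : (k - 1) / 2 = pos
      · rw [hparent, hget_pos, pvGetD_set_ne l pos k _ (by omega)]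
        exact hmin k hk0 hklen hparent
      · rw [pvGetD_set_ne l pos ((k - 1) / 2) _ (by omega), pvGetD_set_ne l pos k _ (by omega)]
        exact hJ1 k hk0 hklen hksub hkp hparent
  · intro k hk0 hklen hkpar
    right
    have hkpos : k ≠ pos := by omega
    have hkc : (k - 1) / 2 ≠ pos := by omega
    rw [hcpar, hget_pos, pvGetD_set_ne l pos k _ (by omega)]
    have := hJ1 k hk0 hklen (by rw [hkpar]; exact hsubc) hkpos hkc
    rwa [hkpar] at this

theorem siftupLoop_spec (l : List Int) (start pos childpos endpos : Nat)
    (he : endpos = l.length) (hc : childpos = 2 * pos + 1) (hpos : pos < endpos)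
    (hsub : inSub start pos = true)
    (hJ1 : ∀ k, 0 < k → k < endpos → inSub start ((k - 1) / 2) = true → k ≠ pos →
      (k - 1) / 2 ≠ pos → l.getD ((k - 1) / 2) 0 ≤ l.getD k 0)
    (hJ6 : ∀ k, 0 < k → k < endpos → (k - 1) / 2 = pos →
      (pos = start ∨ l.getD ((pos - 1) / 2) 0 ≤ l.getD k 0)) :
    (heapSiftupLoop l pos childpos endpos).1.length = l.length ∧
    (heapSiftupLoop l pos childpos endpos).2 < endpos ∧
    inSub start (heapSiftupLoop l pos childpos endpos).2 = true ∧
    endpos ≤ 2 * (heapSiftupLoop l pos childpos endpos).2 + 1 ∧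
    (∀ x : Int, ((heapSiftupLoop l pos childpos endpos).1.set
        (heapSiftupLoop l pos childpos endpos).2 x).Perm (l.set pos x)) ∧
    (∀ j, inSub start j = false →
      (heapSiftupLoop l pos childpos endpos).1.getD j 0 = l.getD j 0) ∧
    (∀ k, 0 < k → k < endpos → inSub start ((k - 1) / 2) = true →
      k ≠ (heapSiftupLoop l pos childpos endpos).2 →
      (k - 1) / 2 ≠ (heapSiftupLoop l pos childpos endpos).2 →
      (heapSiftupLoop l pos childpos endpos).1.getD ((k - 1) / 2) 0 ≤
        (heapSiftupLoop l pos childpos endpos).1.getD k 0) := by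
  fun_induction heapSiftupLoop l pos childpos endpos with
  | case1 l pos childpos hcp hcond ih =>
    have hmin : ∀ k, 0 < k → k < endpos → (k - 1) / 2 = pos →
        l.getD (childpos + 1) 0 ≤ l.getD k 0 := by
      intro k hk0 hklen hkpar
      have : k = childpos ∨ k = childpos + 1 := by omega
      rcases this with rfl | rfl
      · omega
      · exact le_refl _
    obtain ⟨hsubc, hJ1', hJ6'⟩ := siftup_transfer l start pos childpos endpos (childpos + 1)
      he hc hcp (Or.inr rfl) (by omega) hsub hmin hJ1 hJ6
    obtain ⟨i1, i2, i3, i4, i5, i6, i7⟩ := ih (by simp [he]) (by omega)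
      (by omega) hsubc hJ1' hJ6'
    refine ⟨by rw [i1, List.length_set], i2, i3, i4, ?_, ?_, i7⟩
    · intro x
      refine (i5 x).trans ?_
      exact pvSet_set_perm l pos (childpos + 1) x (by omega) (by omega) (by omega)
    · intro j hj
      rw [i6 j hj]
      have hjne : j ≠ pos := by
        intro h; rw [h, hsub] at hj; exact absurd hj (by simp)
      exact pvGetD_set_ne l pos j _ (by omega)
  | case2 l pos childpos hcp hcond ih =>
    have hmin : ∀ k, 0 < k → k < endpos → (k - 1) / 2 = pos →
        l.getD childpos 0 ≤ l.getD k 0 := by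
      intro k hk0 hklen hkpar
      have : k = childpos ∨ k = childpos + 1 := by omega
      rcases this with rfl | rfl
      · exact le_refl _
      · have hlt : l.getD childpos 0 < l.getD (childpos + 1) 0 := by
          by_contra hcon
          exact hcond ⟨by omega, hcon⟩
        exact le_of_lt hlt
    obtain ⟨hsubc, hJ1', hJ6'⟩ := siftup_transfer l start pos childpos endpos childpos
      he hc hcp (Or.inl rfl) hcp hsub hmin hJ1 hJ6
    obtain ⟨i1, i2, i3, i4, i5, i6, i7⟩ := ih (by simp [he]) (by omega)
      (by omega) hsubc hJ1' hJ6'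
    refine ⟨by rw [i1, List.length_set], i2, i3, i4, ?_, ?_, i7⟩
    · intro x
      refine (i5 x).trans ?_
      exact pvSet_set_perm l pos childpos x (by omega) (by omega) (by omega)
    · intro j hj
      rw [i6 j hj]
      have hjne : j ≠ pos := by
        intro h; rw [h, hsub] at hj; exact absurd hj (by simp)
      exact pvGetD_set_ne l pos j _ (by omega)
  | case3 l pos childpos hncp =>
    refine ⟨rfl, by omega, hsub, by omega, fun x => List.Perm.refl _, fun j _ => rfl, ?_⟩
    intro k hk0 hklen hksub hkne hkpne
    exact hJ1 k hk0 hklen hksub hkne hkpne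

def IsHeap (l : List Int) : Prop :=
  ∀ k, 0 < k → k < l.length → l.getD ((k - 1) / 2) 0 ≤ l.getD k 0

theorem siftup_spec (l : List Int) (r : Nat) (hr : r < l.length)
    (hK : ∀ k, 0 < k → k < l.length → inSub r ((k - 1) / 2) = true → k ≠ r →
      (k - 1) / 2 ≠ r → l.getD ((k - 1) / 2) 0 ≤ l.getD k 0) :
    (heapSiftup l r).length = l.length ∧
    (heapSiftup l r).Perm l ∧
    (∀ j, inSub r j = false → (heapSiftup l r).getD j 0 = l.getD j 0) ∧
    (∀ k, 0 < k → k < l.length → inSub r ((k - 1) / 2) = true →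
      (heapSiftup l r).getD ((k - 1) / 2) 0 ≤ (heapSiftup l r).getD k 0) := by
  obtain ⟨i1, i2, i3, i4, i5, i6, i7⟩ :=
    siftupLoop_spec l r r (2 * r + 1) l.length rfl rfl hr (inSub_self r) hK
      (fun k _ _ _ => Or.inl rfl)
  set L' := (heapSiftupLoop l r (2 * r + 1) l.length).1 with hL'
  set p' := (heapSiftupLoop l r (2 * r + 1) l.length).2 with hp'
  set x := l.getD r 0 with hx
  have hres : heapSiftup l r = heapSiftdownLoop (L'.set p' x) r p' ((L'.set p' x).getD p' 0) := rfl
  have hgx : (L'.set p' x).getD p' 0 = x := pvGetD_set_self L' p' x (by rw [i1]; exact i2)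
  rw [hgx] at hres
  have hlen2 : (L'.set p' x).length = l.length := by rw [List.length_set, i1]
  obtain ⟨d1, d2, d3, d4⟩ := siftdownLoop_spec (L'.set p' x) r p' x
    (by rw [hlen2]; exact i2) i3
    (by
      intro k hk0 hklen hksub hkne
      rw [hlen2] at hklen
      have hkpne : (k - 1) / 2 ≠ p' := by omega
      rw [pvGetD_set_ne L' p' _ x (by omega), pvGetD_set_ne L' p' k x (by omega)]
      exact i7 k hk0 hklen hksub hkne hkpne)
    (by intro k hk0 hklen hkpar; rw [hlen2] at hklen; omega)
    (by intro k hk0 hklen hkpar; rw [hlen2] at hklen; omega)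
  rw [← hres] at d1 d2 d3 d4
  have hset2 : (L'.set p' x).set p' x = L'.set p' x := by rw [List.set_set]
  refine ⟨by rw [d1, hlen2], ?_, ?_, ?_⟩
  · refine d2.trans ?_
    rw [hset2]
    refine (i5 x).trans ?_
    rw [hx, pvSet_getD_self]
  · intro j hj
    have hjne : j ≠ p' := by
      intro h; rw [h, i3] at hj; exact absurd hj (by simp)
    rw [d3 j hj, pvGetD_set_ne L' p' j x (by omega)]
    exact i6 j hj
  · intro k hk0 hklen hksub
    exact d4 k hk0 (by rw [hlen2]; exact hklen) hksub

lemma heapify_fold (m : Nat) : ∀ l : List Int, 2 * m ≤ l.length →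
    (∀ k, 0 < k → k < l.length → m ≤ (k - 1) / 2 → l.getD ((k - 1) / 2) 0 ≤ l.getD k 0) →
    ((List.range m).reverse.foldl (fun h i => heapSiftup h i) l).length = l.length ∧
    ((List.range m).reverse.foldl (fun h i => heapSiftup h i) l).Perm l ∧
    IsHeap ((List.range m).reverse.foldl (fun h i => heapSiftup h i) l) := by
  induction m with
  | zero =>
    intro l _ hInv
    exact ⟨rfl, List.Perm.refl _, fun k hk0 hklen => hInv k hk0 hklen (Nat.zero_le _)⟩
  | succ m ih =>
    intro l hm hInv
    rw [List.range_succ, List.reverse_append, List.reverse_singleton, List.singleton_append,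
      List.foldl_cons]
    have hmlt : m < l.length := by omega
    obtain ⟨s1, s2, s3, s4⟩ := siftup_spec l m hmlt (by
      intro k hk0 hklen hksub hkne hkpne
      have hge : m ≤ (k - 1) / 2 := inSub_le hksub
      exact hInv k hk0 hklen (by omega))
    have hInv' : ∀ k, 0 < k → k < (heapSiftup l m).length → m ≤ (k - 1) / 2 →
        (heapSiftup l m).getD ((k - 1) / 2) 0 ≤ (heapSiftup l m).getD k 0 := by
      intro k hk0 hklen hge
      rw [s1] at hklen
      by_cases hs : inSub m ((k - 1) / 2) = true
      · exact s4 k hk0 hklen hs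
      · have hpne : (k - 1) / 2 ≠ m := by
          intro h; rw [h, inSub_self] at hs; exact hs rfl
        have hknot : inSub m k = false := by
          cases hk : inSub m k
          · rfl
          · exfalso
            have hkm : k ≠ m := by
              intro h
              subst h
              omega
            have := inSub_parent hk hkm
            rw [this] at hs
            exact hs rfl
        rw [s3 k hknot, s3 ((k - 1) / 2) (by cases hp : inSub m ((k - 1) / 2); rfl; exact absurd hp hs)]
        exact hInv k hk0 hklen (by omega)
    obtain ⟨t1, t2, t3⟩ := ih (heapSiftup l m) (by omega) hInv'
    exact ⟨by rw [t1, s1], t2.trans s2, t3⟩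

theorem heapify_spec (l : List Int) :
    (heapify l).length = l.length ∧ (heapify l).Perm l ∧ IsHeap (heapify l) := by
  unfold heapify
  exact heapify_fold (l.length / 2) l (by omega) (by intro k hk0 hklen hge; omega)

lemma pvGetD_append_len (h : List Int) (x : Int) : (h ++ [x]).getD h.length 0 = x := by
  rw [List.getD_eq_getElem _ _ (by simp)]
  simp

theorem heappush_spec (h : List Int) (x : Int) (hh : IsHeap h) :
    (heappush h x).length = h.length + 1 ∧ (heappush h x).Perm (x :: h) ∧
    IsHeap (heappush h x) := by
  have hres : heappush h x = heapSiftdownLoop (h ++ [x]) 0 h.length ((h ++ [x]).getD h.length 0) := rfl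
  rw [pvGetD_append_len] at hres
  have hlen : (h ++ [x]).length = h.length + 1 := by simp
  obtain ⟨d1, d2, d3, d4⟩ := siftdownLoop_spec (h ++ [x]) 0 h.length x
    (by omega) (inSub_zero _)
    (by
      intro k hk0 hklen hksub hkne
      rw [hlen] at hklen
      have hklt : k < h.length := by omega
      rw [pvGetD_append_left h [x] _ (by omega), pvGetD_append_left h [x] k hklt]
      exact hh k hk0 hklt)
    (by intro k hk0 hklen hkpar; rw [hlen] at hklen; omega)
    (by intro k hk0 hklen hkpar; rw [hlen] at hklen; omega)
  rw [← hres] at d1 d2 d3 d4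
  have hsetid : (h ++ [x]).set h.length x = h ++ [x] := by
    have := pvSet_getD_self (h ++ [x]) h.length
    rwa [pvGetD_append_len] at this
  refine ⟨by rw [d1, hlen], ?_, ?_⟩
  · rw [hsetid] at d2
    exact d2.trans (List.perm_append_singleton x h)
  · intro k hk0 hklen
    exact d4 k hk0 (by omega) (inSub_zero _)

theorem heappop_spec (h : List Int) (hh : IsHeap h) (hne : h ≠ []) :
    ∃ h', heappop h = some (h.getD 0 0, h') ∧ IsHeap h' ∧
      h'.length = h.length - 1 ∧ h.Perm (h.getD 0 0 :: h') := by
  rcases List.eq_nil_or_concat h with rfl | ⟨d, a, rfl⟩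
  · exact absurd rfl hne
  · simp only [List.concat_eq_append] at hh hne ⊢
    rw [heappop, List.getLast?_concat, List.dropLast_concat]
    cases d with
    | nil =>
      refine ⟨[], by simp [List.getD], ?_, by simp, by simp [List.getD]⟩
      intro k hk0 hklen
      simp at hklen
    | cons b t =>
      simp only [List.isEmpty_cons]
      set d := b :: t with hd
      have hdne : d.isEmpty = false := by simp [hd]
      rw [if_neg (by simp)]
      have hdlen : 0 < d.length := by simp [hd]
      have hL2len : (d.set 0 a).length = d.length := by simp
      obtain ⟨s1, s2, s3, s4⟩ := siftup_spec (d.set 0 a) 0 (by omega) (by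
        intro k hk0 hklen hksub hkne hkpne
        rw [hL2len] at hklen
        have hp0 : 0 < (k - 1) / 2 := by omega
        rw [pvGetD_set_ne d 0 _ a (by omega), pvGetD_set_ne d 0 k a (by omega)]
        have hgd : ∀ j, j < d.length → d.getD j 0 = (d ++ [a]).getD j 0 := by
          intro j hj
          rw [pvGetD_append_left d [a] j hj]
        rw [hgd _ (by omega), hgd k hklen]
        exact hh k hk0 (by simp; omega))
      refine ⟨heapSiftup (d.set 0 a) 0, ?_, ?_, ?_, ?_⟩
      · rw [pvGetD_append_left d [a] 0 hdlen]
      · intro k hk0 hklen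
        exact s4 k hk0 (by rw [← s1]; exact hklen) (inSub_zero _)
      · rw [s1, hL2len]; simp [hd]
      · rw [pvGetD_append_left d [a] 0 hdlen]
        have hperm : (d ++ [a]).Perm (d.getD 0 0 :: d.set 0 a) := by
          rw [hd]
          simp only [List.getD_cons_zero, List.set_cons_zero]
          exact List.Perm.cons b (List.perm_append_singleton a t)
        refine hperm.trans ?_
        exact List.Perm.cons _ s2.symm

lemma heap_root_min (l : List Int) (hh : IsHeap l) :
    ∀ k, k < l.length → l.getD 0 0 ≤ l.getD k 0 := by
  intro k
  induction k using Nat.strong_induction_on with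
  | _ k ih =>
    intro hk
    cases Nat.eq_zero_or_pos k with
    | inl h => subst h; exact le_refl _
    | inr h =>
      calc l.getD 0 0 ≤ l.getD ((k - 1) / 2) 0 := ih ((k - 1) / 2) (by omega) (by omega)
        _ ≤ l.getD k 0 := hh k h hk

lemma minScan_facts (l : List Int) : ∀ c : Int,
    minScan l c ≤ c ∧ (∀ y ∈ l, minScan l c ≤ y) ∧ (minScan l c = c ∨ minScan l c ∈ l) := by
  induction l with
  | nil => intro c; exact ⟨le_refl c, by simp, Or.inl rfl⟩
  | cons a t ih =>
    intro c
    have hstep : minScan (a :: t) c = minScan t (if a < c then a else c) := rfl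
    obtain ⟨h1, h2, h3⟩ := ih (if a < c then a else c)
    rw [hstep]
    refine ⟨le_trans h1 (by split <;> omega), ?_, ?_⟩
    · intro y hy
      rcases List.mem_cons.mp hy with rfl | hy
      · exact le_trans h1 (by split <;> omega)
      · exact h2 y hy
    · rcases h3 with h3 | h3
      · by_cases hac : a < c
        · refine Or.inr ?_
          simp only [if_pos hac] at h3 ⊢
          rw [h3]
          exact List.mem_cons_self
        · refine Or.inl ?_
          simp only [if_neg hac] at h3 ⊢
          exact h3
      · exact Or.inr (List.mem_cons_of_mem a h3)

lemma getD_zero_mem (l : List Int) (hne : l ≠ []) : l.getD 0 0 ∈ l := by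
  cases l with
  | nil => exact absurd rfl hne
  | cons a t => simp [List.getD]

lemma root_le_mem (h : List Int) (hh : IsHeap h) (x : Int) (hx : x ∈ h) :
    h.getD 0 0 ≤ x := by
  obtain ⟨k, hk, rfl⟩ := List.mem_iff_getElem.mp hx
  have := heap_root_min h hh k hk
  rwa [List.getD_eq_getElem h 0 hk] at this

lemma min_eq_root (h l : List Int) (hh : IsHeap h) (hp : h.Perm l) (hne : l ≠ []) :
    minScan l (l.getD 0 0) = h.getD 0 0 := by
  have hhne : h ≠ [] := by
    intro hcon; rw [hcon] at hp; exact hne hp.nil_eq.symm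
  obtain ⟨m1, m2, m3⟩ := minScan_facts l (l.getD 0 0)
  have hMmem : minScan l (l.getD 0 0) ∈ l := by
    rcases m3 with h3 | h3
    · rw [h3]; exact getD_zero_mem l hne
    · exact h3
  have hrootmem : h.getD 0 0 ∈ l := hp.mem_iff.mp (getD_zero_mem h hhne)
  have hle1 : minScan l (l.getD 0 0) ≤ h.getD 0 0 := m2 _ hrootmem
  have hle2 : h.getD 0 0 ≤ minScan l (l.getD 0 0) :=
    root_le_mem h hh _ (hp.mem_iff.mpr hMmem)
  omega

lemma loops_eq : ∀ (fuel : Nat) (h l : List Int) (K ans : Int), IsHeap h → h.Perm l →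
    solutionLoop fuel h K ans = solutionAltLoop fuel l K ans := by
  intro fuel
  induction fuel with
  | zero => intro h l K ans _ _; rfl
  | succ fuel ih =>
    intro h l K ans hh hp
    by_cases hle : l = []
    · subst hle
      have hhe : h = [] := hp.symm.nil_eq.symm
      subst hhe
      simp [solutionLoop, solutionAltLoop, minScan, List.getD]
    · have hmin : minScan l (l.getD 0 0) = h.getD 0 0 := min_eq_root h l hh hp hle
      have hlen : h.length = l.length := hp.length_eq
      simp only [solutionLoop, solutionAltLoop, hmin]
      by_cases hK : h.getD 0 0 ≥ K
      · rw [if_pos hK, if_pos hK]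
      · rw [if_neg hK, if_neg hK]
        by_cases h2 : l.length < 2
        · rw [if_pos (by omega), if_pos h2]
        · rw [if_neg (by omega), if_neg h2]
          have hhne : h ≠ [] := by
            intro hcon; subst hcon; simp at hlen; omega
          obtain ⟨h1, hpop1, hh1, hlen1, hperm1⟩ := heappop_spec h hh hhne
          have hh1ne : h1 ≠ [] := by
            intro hcon
            rw [hcon] at hlen1
            simp at hlen1
            omega
          obtain ⟨h2', hpop2, hh2, hlen2, hperm2⟩ := heappop_spec h1 hh1 hh1ne
          -- B side pieces
          have hMmem : h.getD 0 0 ∈ l := hp.mem_iff.mp (getD_zero_mem h hhne)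
          set l1 := l.erase (h.getD 0 0) with hl1
          have hperm_h1_l1 : h1.Perm l1 := by
            have hc : (h.getD 0 0 :: h1).Perm (h.getD 0 0 :: l1) :=
              hperm1.symm.trans (hp.trans (List.perm_cons_erase hMmem))
            exact hc.cons_inv
          have hl1ne : l1 ≠ [] := by
            intro hcon
            rw [hcon] at hperm_h1_l1
            exact hh1ne hperm_h1_l1.symm.nil_eq.symm
          have hmin2 : minScan l1 (l1.getD 0 0) = h1.getD 0 0 :=
            min_eq_root h1 l1 hh1 hperm_h1_l1 hl1ne
          simp only [hpop1, hpop2, hmin2]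
          set l2 := l1.erase (h1.getD 0 0) with hl2
          have hM2mem : h1.getD 0 0 ∈ l1 := hperm_h1_l1.mem_iff.mp (getD_zero_mem h1 hh1ne)
          have hperm_h2_l2 : h2'.Perm l2 := by
            have hc : (h1.getD 0 0 :: h2').Perm (h1.getD 0 0 :: l2) :=
              hperm2.symm.trans (hperm_h1_l1.trans (List.perm_cons_erase hM2mem))
            exact hc.cons_inv
          obtain ⟨pu1, pu2, pu3⟩ := heappush_spec h2' (h.getD 0 0 + h1.getD 0 0 * 2) hh2
          have hval : h.getD 0 0 + h1.getD 0 0 * 2 = h.getD 0 0 + 2 * h1.getD 0 0 := by ring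
          refine Eq.trans (ih (heappush h2' (h.getD 0 0 + h1.getD 0 0 * 2))
            (l2 ++ [h.getD 0 0 + 2 * h1.getD 0 0]) K (ans + 1) pu3 ?_) rfl
          refine pu2.trans ?_
          rw [← hval]
          exact ((List.perm_append_singleton (h.getD 0 0 + h1.getD 0 0 * 2) l2).trans
            (List.Perm.cons _ hperm_h2_l2.symm)).symm

-- ===== VERDICT (by name: the statement is the Claim_ definition above) =====
theorem solution_spec : Claim_equal_solution := by
  intro scoville K _ _
  obtain ⟨f1, f2, f3⟩ := heapify_spec scoville
  exact loops_eq scoville.length (heapify scoville) scoville K 0 f3 f2
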